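-- pv_equiv track=rewrite | github.com/DavAnaton/google-foobar | level_2/en_route/solution.py | answer
-- ===== SOURCE A (Python) =====
-- def answer(hallway):
-- 	hellos = 0
-- 	walkingRight = 0
-- 	for char in hallway:
-- 		if char == '>':
-- 			walkingRight+=1
-- 		elif char == '<':
-- 			hellos += walkingRight * 2
-- 	return hellos
-- ===== SOURCE B (Python) =====
-- def answer(hallway):
--     n = len(hallway)
--     total = 0
--     for i in range(n):
--         if hallway[i] == '>':
--             for j in range(i + 1, n):
--                 if hallway[j] == '<':
--                     total += 2
--     return total
-- ===== Notes on version B (the rewrite author's own statement) =====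
-- stated objective: alternative
-- what changed: B replaces A's single accumulator pass (running count of '>') by a nested double loop over index pairs, adding 2 for every '>' at i followed by '<' at j>i.
import Mathlib
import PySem

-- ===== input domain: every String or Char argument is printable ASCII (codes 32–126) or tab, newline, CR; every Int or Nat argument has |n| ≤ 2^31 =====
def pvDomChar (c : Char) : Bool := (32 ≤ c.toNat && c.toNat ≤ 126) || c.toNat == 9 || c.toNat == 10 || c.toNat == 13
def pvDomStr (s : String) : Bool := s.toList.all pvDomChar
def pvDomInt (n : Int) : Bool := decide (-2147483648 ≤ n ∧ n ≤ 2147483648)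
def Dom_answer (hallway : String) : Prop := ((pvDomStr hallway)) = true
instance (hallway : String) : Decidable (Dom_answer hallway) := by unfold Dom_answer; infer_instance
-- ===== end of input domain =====

-- B is an alternative O(n^2) pair-counting re-implementation of A's one-pass accumulator; return values proved equal.
-- ===== PORT A =====
-- single pass: state = (hellos, walkingRight)
def answer (hallway : String) : Int :=
  (hallway.toList.foldl
    (fun (s : Int × Int) c =>
      if c = '>' then (s.1, s.2 + 1)
      else if c = '<' then (s.1 + s.2 * 2, s.2)
      else s)
    (0, 0)).1

-- ===== PORT B =====
-- inner loop of Source B: scan the elements after position i, adding 2 per '<'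
def pvScanLt : List Char → Int
  | [] => 0
  | c :: t => (if c = '<' then 2 else 0) + pvScanLt t

-- outer loop of Source B over indices i; recursion on the list = index loop front to back
def pvOuter : List Char → Int
  | [] => 0
  | c :: t => (if c = '>' then pvScanLt t else 0) + pvOuter t

def answer_alt (hallway : String) : Int := pvOuter hallway.toList

-- ===== PRECONDITION & SPEC =====
def Spec_answer (hallway : String) (out : Int) : Prop := out = answer_alt hallway
instance (hallway : String) (out : Int) : Decidable (Spec_answer hallway out) := by unfold Spec_answer; infer_instance

-- ===== CLAIM (what is proved, stated in full; the proofs are below) =====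
def Claim_equal_answer : Prop := ∀ (hallway : String), Dom_answer hallway → Spec_answer hallway (answer hallway)

-- ===== LEMMAS AND PROOFS =====
theorem pv_fold_invariant (l : List Char) (h r : Int) :
    (l.foldl
      (fun (s : Int × Int) c =>
        if c = '>' then (s.1, s.2 + 1)
        else if c = '<' then (s.1 + s.2 * 2, s.2)
        else s)
      (h, r)).1 = h + r * pvScanLt l + pvOuter l := by
  induction l generalizing h r with
  | nil => simp [pvScanLt, pvOuter]
  | cons c t ih =>
    by_cases hgt : c = '>'
    · simp [hgt, List.foldl, pvScanLt, pvOuter, ih]; ring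
    · by_cases hlt : c = '<'
      · simp [hgt, hlt, List.foldl, pvScanLt, pvOuter, ih]; ring
      · simp [hgt, hlt, List.foldl, pvScanLt, pvOuter, ih]

-- ===== VERDICT (by name: the statement is the Claim_ definition above) =====
theorem answer_spec : Claim_equal_answer := by
  intro hallway _
  unfold Spec_answer answer answer_alt
  rw [pv_fold_invariant]
  ring
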